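-- pv_equiv track=rewrite | github.com/pypi-data/pypi-mirror-39 | packages/traffic-replay/traffic_replay-1.0.0.tar.gz/traffic_replay-1.0.0/src/traffic_replay/h1Replay.py | createDummyBodywithLength
-- ===== SOURCE A (Python) =====
-- def createDummyBodywithLength(numberOfbytes):
--     if numberOfbytes <= 0:
--         return None
--     body = 'a'
--     while numberOfbytes != 1:
--         body += 'b'
--         numberOfbytes -= 1
--     return body
-- ===== SOURCE B (Python) =====
-- def createDummyBodywithLength(numberOfbytes):
--     if numberOfbytes <= 0:
--         return None
--     return 'a' + 'b' * (numberOfbytes - 1)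
-- ===== Notes on version B (the rewrite author's own statement) =====
-- stated objective: faster
-- what changed: Replaces the character-by-character while-loop accumulation with the closed-form expression 'a' + 'b'*(n-1).
import Mathlib
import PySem

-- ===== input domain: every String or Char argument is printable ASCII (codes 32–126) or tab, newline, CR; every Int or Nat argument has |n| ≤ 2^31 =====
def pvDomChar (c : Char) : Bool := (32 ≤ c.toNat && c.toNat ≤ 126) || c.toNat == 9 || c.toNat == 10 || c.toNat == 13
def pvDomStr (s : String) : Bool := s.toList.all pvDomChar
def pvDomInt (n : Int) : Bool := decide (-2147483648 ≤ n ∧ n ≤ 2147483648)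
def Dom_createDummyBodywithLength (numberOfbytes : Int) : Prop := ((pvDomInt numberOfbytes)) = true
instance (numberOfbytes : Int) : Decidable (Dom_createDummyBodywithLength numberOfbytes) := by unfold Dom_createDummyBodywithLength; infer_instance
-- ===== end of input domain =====

-- B replaces A's append-loop with the closed-form 'a' + 'b'*(n-1); same guard, same result.


-- ===== PORT A =====
-- A's while loop: append 'b' while numberOfbytes != 1, counting down; here counted by (n-1).toNat
def pvALoop : Nat → List Char → List Char
  | 0, body => body
  | k+1, body => pvALoop k (body ++ ['b'])

def createDummyBodywithLength (numberOfbytes : Int) : Option String :=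
  if numberOfbytes ≤ 0 then none
  else some (String.mk (pvALoop (numberOfbytes - 1).toNat ['a']))

-- ===== PORT B =====
-- B: closed form 'a' + 'b'*(n-1)
def createDummyBodywithLength_alt (numberOfbytes : Int) : Option String :=
  if numberOfbytes ≤ 0 then none
  else some (String.mk ('a' :: PySem.List.pyRepeat ['b'] (numberOfbytes - 1)))

-- ===== PRECONDITION & SPEC =====
def Spec_createDummyBodywithLength (numberOfbytes : Int) (out : Option String) : Prop := out = createDummyBodywithLength_alt numberOfbytes
instance (numberOfbytes : Int) (out : Option String) : Decidable (Spec_createDummyBodywithLength numberOfbytes out) := by unfold Spec_createDummyBodywithLength; infer_instance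

-- ===== CLAIM (what is proved, stated in full; the proofs are below) =====
def Claim_equal_createDummyBodywithLength : Prop := ∀ (numberOfbytes : Int), Dom_createDummyBodywithLength numberOfbytes → Spec_createDummyBodywithLength numberOfbytes (createDummyBodywithLength numberOfbytes)

-- ===== LEMMAS AND PROOFS =====

theorem pvALoop_eq (k : Nat) (body : List Char) :
    pvALoop k body = body ++ List.replicate k 'b' := by
  induction k generalizing body with
  | zero => simp [pvALoop]
  | succ k ih =>
      simp [pvALoop, ih, List.replicate_succ]

-- ===== VERDICT (by name: the statement is the Claim_ definition above) =====
theorem createDummyBodywithLength_spec : Claim_equal_createDummyBodywithLength := by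
  intro n _
  unfold Spec_createDummyBodywithLength createDummyBodywithLength createDummyBodywithLength_alt
  split
  · rfl
  · simp [pvALoop_eq, PySem.List.pyRepeat_singleton]
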